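-- pv_equiv track=rewrite | github.com/ZHICHENGH/COMP30024 | makeaction.py | getBoomResult
-- ===== SOURCE A (Python) =====
-- def CoorIsValid(coor):
--     if (coor[0]>=0 and coor[0]<=7):
--         if (coor[1]>=0 and coor[1]<=7):
--             return True
--     return False
--
-- def getboomArea(coor):
--     x=coor[0]
--     y=coor[1]
--     result=[]
--     ls=[(x-1,y-1),(x-1,y),(x-1,y+1),(x,y-1),(x,y+1),(x+1,y-1),(x+1,y),(x+1,y+1)]
--     for i in ls:
--         if(CoorIsValid(i)):
--             result.append(i)
--     return result
--
-- def getBoomResult(boomArea,aimtokens):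
--     boomtoken=[i for i in aimtokens if i in boomArea]
--     if(len(boomtoken)!=0):
--         tmptokens=[i for i in aimtokens if i not in boomArea]
--         for i in boomtoken:
--             boomtoken=boomtoken+getBoomResult(getboomArea(i),tmptokens)
--         return boomtoken
--     else:
--         return []
-- ===== SOURCE B (Python) =====
-- def CoorIsValid(coor):
--     if (coor[0]>=0 and coor[0]<=7):
--         if (coor[1]>=0 and coor[1]<=7):
--             return True
--     return False
--
-- def getboomArea(coor):
--     x=coor[0]
--     y=coor[1]
--     result=[]
--     ls=[(x-1,y-1),(x-1,y),(x-1,y+1),(x,y-1),(x,y+1),(x+1,y-1),(x+1,y),(x+1,y+1)]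
--     for i in ls:
--         if(CoorIsValid(i)):
--             result.append(i)
--     return result
--
-- def getBoomResult(boomArea, aimtokens):
--     result = []
--     stack = [(boomArea, aimtokens)]
--     while stack:
--         area, toks = stack.pop()
--         boomtoken = [i for i in toks if i in area]
--         if not boomtoken:
--             continue
--         tmptokens = [i for i in toks if i not in area]
--         result += boomtoken
--         for i in reversed(boomtoken):
--             stack.append((getboomArea(i), tmptokens))
--     return result
-- ===== Notes on version B (the rewrite author's own statement) =====
-- stated objective: alternative
-- what changed: A's tree recursion (each boomed token recursively re-booms the remaining tokens, concatenating results in preorder) is replaced by an explicit worklist/stack loop with a result accumulator that pops (area, tokens) pairs and pushes child areas in order, producing the same preorder concatenation iteratively.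
import Mathlib
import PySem

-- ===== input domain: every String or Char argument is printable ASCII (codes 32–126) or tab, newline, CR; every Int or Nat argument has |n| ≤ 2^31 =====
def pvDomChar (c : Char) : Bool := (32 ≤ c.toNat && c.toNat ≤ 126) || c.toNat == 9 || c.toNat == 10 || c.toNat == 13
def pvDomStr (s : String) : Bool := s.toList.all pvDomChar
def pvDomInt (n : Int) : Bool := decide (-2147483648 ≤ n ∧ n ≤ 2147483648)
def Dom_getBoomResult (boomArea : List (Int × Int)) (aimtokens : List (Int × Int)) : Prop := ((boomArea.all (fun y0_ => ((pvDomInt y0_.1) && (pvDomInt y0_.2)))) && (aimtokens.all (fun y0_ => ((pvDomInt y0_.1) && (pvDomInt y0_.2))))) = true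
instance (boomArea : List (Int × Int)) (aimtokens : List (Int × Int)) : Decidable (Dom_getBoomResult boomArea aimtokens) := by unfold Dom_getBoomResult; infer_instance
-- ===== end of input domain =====

-- B replaces A's tree recursion by an explicit worklist (stack) loop with an accumulator,
-- reproducing A's exact preorder concatenation; objective: alternative (no speed claim).

-- ===== PORT A =====
def CoorIsValid (coor : Int × Int) : Bool :=
  if coor.1 ≥ 0 ∧ coor.1 ≤ 7 then
    if coor.2 ≥ 0 ∧ coor.2 ≤ 7 then true else false
  else false

def getboomArea (coor : Int × Int) : List (Int × Int) :=
  let x := coor.1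
  let y := coor.2
  let ls := [(x-1,y-1),(x-1,y),(x-1,y+1),(x,y-1),(x,y+1),(x+1,y-1),(x+1,y),(x+1,y+1)]
  ls.foldl (fun result i => if CoorIsValid i then result ++ [i] else result) []

-- bridge lemmas for the attach-form goals WF recursion produces (cited by decreasing_by)
theorem pv_unattach_filter_mem (area l : List (Int × Int)) :
    (List.filter (fun x => area.contains x.val) l.attach).unattach
      = l.filter (fun i => area.contains i) := by
  rw [List.unattach_filter (g := fun i => area.contains i) (hf := fun _ _ => rfl), List.unattach_attach]

theorem pv_unattach_filter_not_mem (area l : List (Int × Int)) :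
    (List.filter (fun x => !area.contains x.val) l.attach).unattach
      = l.filter (fun i => !area.contains i) := by
  rw [List.unattach_filter (g := fun i => !area.contains i) (hf := fun _ _ => rfl), List.unattach_attach]

-- termination helper for port A (cited by decreasing_by)
theorem pv_filter_not_lt (boomArea aimtokens : List (Int × Int))
    (h : (aimtokens.filter (fun i => boomArea.contains i)).length ≠ 0) :
    (aimtokens.filter (fun i => !boomArea.contains i)).length < aimtokens.length := by
  have hpart : aimtokens.length = (aimtokens.filter (fun i => boomArea.contains i)).length
      + (aimtokens.filter (fun i => !boomArea.contains i)).length :=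
    List.length_eq_length_filter_add _
  omega

def getBoomResult (boomArea : List (Int × Int)) (aimtokens : List (Int × Int)) : List (Int × Int) :=
  let boomtoken := aimtokens.filter (fun i => boomArea.contains i)
  if h : boomtoken.length ≠ 0 then
    let tmptokens := aimtokens.filter (fun i => !boomArea.contains i)
    boomtoken.foldl (fun acc i => acc ++ getBoomResult (getboomArea i) tmptokens) boomtoken
  else []
termination_by aimtokens.length
decreasing_by
  simp only [boomtoken] at h
  simp only [pv_unattach_filter_mem, pv_unattach_filter_not_mem] at h ⊢
  exact pv_filter_not_lt boomArea aimtokens h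

-- ===== PORT B =====
-- measure for the worklist loop (cited by decreasing_by)
def pvStackMeasure (stack : List (List (Int × Int) × List (Int × Int))) : Nat :=
  (stack.map (fun e => (e.2.length + 1).factorial)).sum

theorem pv_measure_skip (area toks : List (Int × Int))
    (rest : List (List (Int × Int) × List (Int × Int))) :
    pvStackMeasure rest < pvStackMeasure ((area, toks) :: rest) := by
  simp only [pvStackMeasure, List.map_cons, List.sum_cons]
  have := Nat.factorial_pos (toks.length + 1)
  omega

theorem pv_measure_push (area toks : List (Int × Int))
    (rest : List (List (Int × Int) × List (Int × Int)))
    (h : ¬ (toks.filter (fun i => area.contains i)).isEmpty = true) :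
    pvStackMeasure (((toks.filter (fun i => area.contains i)).map
        (fun i => (getboomArea i, toks.filter (fun i => !area.contains i)))) ++ rest)
      < pvStackMeasure ((area, toks) :: rest) := by
  set bt := toks.filter (fun i => area.contains i) with hbt
  set tmp := toks.filter (fun i => !area.contains i) with htmp
  have hsplit : toks.length = bt.length + tmp.length := by
    rw [hbt, htmp]; exact List.length_eq_length_filter_add _
  have hb : 1 ≤ bt.length := by
    rcases Nat.eq_zero_or_pos bt.length with h0 | h0
    · exact absurd (List.isEmpty_iff.mpr (List.length_eq_zero_iff.mp h0)) h
    · exact h0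
  have key : bt.length * (tmp.length + 1).factorial < (toks.length + 1).factorial := by
    have h2 : (tmp.length + 1).factorial ≤ toks.length.factorial :=
      Nat.factorial_le (by omega)
    calc bt.length * (tmp.length + 1).factorial
        ≤ toks.length * toks.length.factorial := Nat.mul_le_mul (by omega) h2
      _ < (toks.length + 1) * toks.length.factorial :=
          Nat.mul_lt_mul_of_lt_of_le (Nat.lt_succ_self _) (Nat.le_refl _) (Nat.factorial_pos _)
      _ = (toks.length + 1).factorial := (Nat.factorial_succ _).symm
  simp only [pvStackMeasure, List.map_append, List.sum_append, List.map_map, List.map_cons,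
    List.sum_cons, Function.comp_def]
  have hconst : (bt.map (fun _ => (tmp.length + 1).factorial)).sum
      = bt.length * (tmp.length + 1).factorial := by
    rw [List.map_const', List.sum_replicate, smul_eq_mul]
  rw [hconst]
  omega

def altLoop (result : List (Int × Int)) (stack : List (List (Int × Int) × List (Int × Int))) :
    List (Int × Int) :=
  match stack with
  | [] => result
  | (area, toks) :: rest =>
    let boomtoken := toks.filter (fun i => area.contains i)
    if h : boomtoken.isEmpty then altLoop result rest
    else
      let tmptokens := toks.filter (fun i => !area.contains i)
      altLoop (result ++ boomtoken)
        ((boomtoken.map (fun i => (getboomArea i, tmptokens))) ++ rest)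
termination_by pvStackMeasure stack
decreasing_by
  · exact pv_measure_skip area toks rest
  · simp only [boomtoken] at h
    simp only [pv_unattach_filter_mem, pv_unattach_filter_not_mem] at h ⊢
    exact pv_measure_push area toks rest h

def getBoomResult_alt (boomArea : List (Int × Int)) (aimtokens : List (Int × Int)) :
    List (Int × Int) :=
  altLoop [] [(boomArea, aimtokens)]

-- ===== PRECONDITION & SPEC =====
def Spec_getBoomResult (boomArea : List (Int × Int)) (aimtokens : List (Int × Int)) (out : List (Int × Int)) : Prop := out = getBoomResult_alt boomArea aimtokens
instance (boomArea : List (Int × Int)) (aimtokens : List (Int × Int)) (out : List (Int × Int)) : Decidable (Spec_getBoomResult boomArea aimtokens out) := by unfold Spec_getBoomResult; infer_instance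

-- ===== CLAIM (what is proved, stated in full; the proofs are below) =====
def Claim_equal_getBoomResult : Prop := ∀ (boomArea : List (Int × Int)) (aimtokens : List (Int × Int)), Dom_getBoomResult boomArea aimtokens → Spec_getBoomResult boomArea aimtokens (getBoomResult boomArea aimtokens)

-- ===== LEMMAS AND PROOFS =====
theorem getBoomResult_of_empty (area toks : List (Int × Int))
    (h : (toks.filter (fun i => area.contains i)).isEmpty = true) :
    getBoomResult area toks = [] := by
  have h0 : ¬ (toks.filter (fun i => area.contains i)).length ≠ 0 := by
    rw [List.isEmpty_iff.mp h]; simp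
  rw [getBoomResult.eq_def]
  exact dif_neg h0

theorem getBoomResult_of_pos (area toks : List (Int × Int))
    (h : ¬ (toks.filter (fun i => area.contains i)).isEmpty = true) :
    getBoomResult area toks = (toks.filter (fun i => area.contains i))
      ++ ((toks.filter (fun i => area.contains i)).map
          (fun i => getBoomResult (getboomArea i) (toks.filter (fun i => !area.contains i)))).flatten := by
  have h0 : (toks.filter (fun i => area.contains i)).length ≠ 0 := by
    intro h0; exact h (List.isEmpty_iff.mpr (List.length_eq_zero_iff.mp h0))
  rw [getBoomResult.eq_def]
  simp only [dif_pos h0]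
  rw [PySem.List.foldl_append_eq_flatMap]
  simp [List.flatMap_def]

theorem altLoop_eq (result : List (Int × Int))
    (stack : List (List (Int × Int) × List (Int × Int))) :
    altLoop result stack
      = result ++ (stack.map (fun e => getBoomResult e.1 e.2)).flatten := by
  fun_induction altLoop result stack with
  | case1 result => simp
  | case2 result area toks rest boomtoken h ih =>
    simp only [boomtoken] at h
    simp only [pv_unattach_filter_mem] at h
    simp only [h, dite_true]
    simp [getBoomResult_of_empty area toks h, ih]
  | case3 result area toks rest boomtoken h tmptokens ih =>
    simp only [boomtoken] at h
    simp only [pv_unattach_filter_mem] at h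
    simp only [boomtoken, tmptokens] at ih
    simp only [pv_unattach_filter_mem, pv_unattach_filter_not_mem] at ih
    simp only [h, Bool.false_eq_true, dite_false]
    rw [ih]
    simp only [List.map_cons, List.flatten_cons]
    rw [getBoomResult_of_pos area toks h]
    simp [List.map_append, List.flatten_append, List.map_map, Function.comp_def,
      List.append_assoc]

-- ===== VERDICT (by name: the statement is the Claim_ definition above) =====
theorem getBoomResult_spec : Claim_equal_getBoomResult := by
  intro boomArea aimtokens _
  unfold Spec_getBoomResult getBoomResult_alt
  rw [altLoop_eq]
  simp
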